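-- pv_equiv track=rewrite | github.com/SnyderConsulting/imperium-deck-client | tools/deck_live_monitor.py | merged_state
-- ===== SOURCE A (Python) =====
-- from typing import Any
--
-- def merged_state(state_by_dev: dict[str, Any]) -> tuple[dict[str, int], dict[str, int], dict[str, int]]:
--     buttons: dict[str, int] = {}
--     axes: dict[str, int] = {}
--     hits: dict[str, int] = {}
--
--     for dev in state_by_dev.values():
--         for k, v in (dev.get("buttons") or {}).items():
--             if int(v) != 0:
--                 buttons[k] = int(v)
--             elif k not in buttons:
--                 buttons[k] = 0
--         for k, v in (dev.get("axes") or {}).items():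
--             v = int(v)
--             if k not in axes or abs(v) > abs(axes[k]):
--                 axes[k] = v
--         for k, v in (dev.get("hits") or {}).items():
--             hits[k] = max(int(v), hits.get(k, 0))
--     return buttons, axes, hits
-- ===== SOURCE B (Python) =====
-- def _group(state_by_dev, kind):
--     out = {}
--     for dev in state_by_dev.values():
--         for k, v in (dev.get(kind) or {}).items():
--             out.setdefault(k, []).append(int(v))
--     return out
--
--
-- def _last_nonzero(vals):
--     acc = 0
--     for v in vals:
--         if v != 0:
--             acc = v
--     return acc
--
--
-- def _max_abs(vals):
--     best = 0
--     for v in vals: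
--         if abs(v) > abs(best):
--             best = v
--     return best
--
--
-- def _max_pos(vals):
--     m = 0
--     for v in vals:
--         m = max(v, m)
--     return m
--
--
-- def merged_state(state_by_dev):
--     buttons = {k: _last_nonzero(vs) for k, vs in _group(state_by_dev, "buttons").items()}
--     axes = {k: _max_abs(vs) for k, vs in _group(state_by_dev, "axes").items()}
--     hits = {k: _max_pos(vs) for k, vs in _group(state_by_dev, "hits").items()}
--     return buttons, axes, hits
-- ===== Notes on version B (the rewrite author's own statement) =====
-- stated objective: alternative
-- what changed: B replaces A's incremental per-device dict updates with a two-phase group-then-reduce decomposition: one grouping pass collects each key's value list per category, then each list is reduced separately (last nonzero for buttons, max-|v|-first-wins for axes, max-with-0 for hits).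
import Mathlib
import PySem

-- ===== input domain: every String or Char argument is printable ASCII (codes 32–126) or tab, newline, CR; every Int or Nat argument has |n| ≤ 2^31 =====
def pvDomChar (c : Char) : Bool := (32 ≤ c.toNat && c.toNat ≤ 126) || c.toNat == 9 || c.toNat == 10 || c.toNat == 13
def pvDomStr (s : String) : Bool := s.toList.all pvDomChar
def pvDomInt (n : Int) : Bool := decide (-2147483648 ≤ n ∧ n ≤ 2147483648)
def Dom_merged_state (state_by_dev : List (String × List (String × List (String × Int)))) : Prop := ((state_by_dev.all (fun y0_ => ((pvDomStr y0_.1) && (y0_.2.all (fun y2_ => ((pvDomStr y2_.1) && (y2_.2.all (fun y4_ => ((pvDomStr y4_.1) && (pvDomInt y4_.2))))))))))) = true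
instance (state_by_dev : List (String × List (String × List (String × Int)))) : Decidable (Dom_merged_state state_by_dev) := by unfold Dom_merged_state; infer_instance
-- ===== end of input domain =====

-- B groups all (key, value) pairs per category first and then reduces each value list in a
-- second pass (alternative two-phase decomposition; same return value, same item order).

-- ===== PORT A =====
-- dev.get(cat) or {}  (None → {}; an empty dict is falsy and also yields {})
def pvCat (dev : List (String × List (String × Int))) (cat : String) : List (String × Int) :=
  ((PySem.Dict.mk dev).get? cat).getD []

-- body of A's buttons loop
def pvBtnStep (b : PySem.Dict String Int) (kv : String × Int) : PySem.Dict String Int :=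
  if kv.2 ≠ 0 then b.insert kv.1 kv.2
  else if b.contains kv.1 = false then b.insert kv.1 0
  else b

-- body of A's axes loop
def pvAxStep (a : PySem.Dict String Int) (kv : String × Int) : PySem.Dict String Int :=
  if a.contains kv.1 = false ∨ |kv.2| > |a.getD kv.1 0| then a.insert kv.1 kv.2 else a

-- body of A's hits loop
def pvHitStep (h : PySem.Dict String Int) (kv : String × Int) : PySem.Dict String Int :=
  h.insert kv.1 (max kv.2 (h.getD kv.1 0))

-- one iteration of A's device loop (three inner loops over the three sub-dicts)
def pvDevStep (acc : PySem.Dict String Int × PySem.Dict String Int × PySem.Dict String Int)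
    (dev : List (String × List (String × Int))) :
    PySem.Dict String Int × PySem.Dict String Int × PySem.Dict String Int :=
  ((pvCat dev "buttons").foldl pvBtnStep acc.1,
   (pvCat dev "axes").foldl pvAxStep acc.2.1,
   (pvCat dev "hits").foldl pvHitStep acc.2.2)

def merged_state (state_by_dev : List (String × List (String × List (String × Int)))) : (List (String × Int)) × (List (String × Int)) × (List (String × Int)) :=
  let r := (state_by_dev.map (fun p => p.2)).foldl pvDevStep
      (PySem.Dict.empty, PySem.Dict.empty, PySem.Dict.empty)
  (r.1.items, r.2.1.items, r.2.2.items)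

-- ===== PORT B =====
-- dev.get(kind) or {}  in _group (None → {}; empty dict is falsy and also yields {})
def pvCatAlt (dev : List (String × List (String × Int))) (kind : String) : List (String × Int) :=
  ((PySem.Dict.mk dev).get? kind).getD []

-- out.setdefault(k, []).append(int(v)) over all devices for one category
def pvGroup (state_by_dev : List (String × List (String × List (String × Int)))) (cat : String) :
    PySem.Dict String (List Int) :=
  (state_by_dev.map (fun p => p.2)).foldl
    (fun g dev => (pvCatAlt dev cat).foldl (fun g kv => g.modify kv.1 [] (fun vs => vs ++ [kv.2])) g)
    PySem.Dict.empty

def pvLastNonzero (acc v : Int) : Int := if v ≠ 0 then v else acc     -- body of _last_nonzero's loop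
def pvMaxAbs (best v : Int) : Int := if |v| > |best| then v else best -- body of _max_abs's loop
def pvMaxPos (m v : Int) : Int := max v m                             -- body of _max_pos's loop

def merged_state_alt (state_by_dev : List (String × List (String × List (String × Int)))) : (List (String × Int)) × (List (String × Int)) × (List (String × Int)) :=
  ((pvGroup state_by_dev "buttons").items.map (fun p => (p.1, p.2.foldl pvLastNonzero 0)),
   (pvGroup state_by_dev "axes").items.map (fun p => (p.1, p.2.foldl pvMaxAbs 0)),
   (pvGroup state_by_dev "hits").items.map (fun p => (p.1, p.2.foldl pvMaxPos 0)))

-- ===== PRECONDITION & SPEC =====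
def Spec_merged_state (state_by_dev : List (String × List (String × List (String × Int)))) (out : (List (String × Int)) × (List (String × Int)) × (List (String × Int))) : Prop := out = merged_state_alt state_by_dev
instance (state_by_dev : List (String × List (String × List (String × Int)))) (out : (List (String × Int)) × (List (String × Int)) × (List (String × Int))) : Decidable (Spec_merged_state state_by_dev out) := by unfold Spec_merged_state; infer_instance

-- ===== CLAIM (what is proved, stated in full; the proofs are below) =====
def Claim_equal_merged_state : Prop := ∀ (state_by_dev : List (String × List (String × List (String × Int)))), Dom_merged_state state_by_dev → Spec_merged_state state_by_dev (merged_state state_by_dev)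

-- ===== LEMMAS AND PROOFS =====

-- generic single insert-update step: d[k] = f(d.get(k, 0), v)
def pvUpd (f : Int → Int → Int) (d : PySem.Dict String Int) (kv : String × Int) :
    PySem.Dict String Int := d.insert kv.1 (f (d.getD kv.1 0) kv.2)

-- grouping step: g[k] = g.get(k, []) + [v]
def pvGStep (g : PySem.Dict String (List Int)) (kv : String × Int) : PySem.Dict String (List Int) :=
  g.modify kv.1 [] (fun vs => vs ++ [kv.2])

-- reduce every grouped list with f from 0
def pvMapRed (f : Int → Int → Int) (g : PySem.Dict String (List Int)) : PySem.Dict String Int :=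
  PySem.Dict.mk (g.items.map (fun p => (p.1, p.2.foldl f 0)))

-- all (k, v) pairs of one category across devices, in device order
def pvPairs (state_by_dev : List (String × List (String × List (String × Int)))) (cat : String) :
    List (String × Int) :=
  (state_by_dev.map (fun p => p.2)).flatMap (fun dev => pvCat dev cat)

theorem pvFoldl_flatMap {α β γ : Type} (sel : α → List β) (f : γ → β → γ) :
    ∀ (l : List α) (g : γ), l.foldl (fun g a => (sel a).foldl f g) g = (l.flatMap sel).foldl f g := by
  intro l
  induction l with
  | nil => intro g; rfl
  | cons a t ih => intro g; simp [List.flatMap_cons, List.foldl_append, ih]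

theorem pvGroup_eq_foldl (sbd : List (String × List (String × List (String × Int)))) (cat : String) :
    pvGroup sbd cat = (pvPairs sbd cat).foldl pvGStep PySem.Dict.empty := by
  unfold pvGroup pvPairs pvGStep pvCatAlt pvCat
  exact pvFoldl_flatMap (fun dev => ((PySem.Dict.mk dev).get? cat).getD []) _ _ _

theorem pvDevFoldAux :
    ∀ (devs : List (List (String × List (String × Int))))
      (acc : PySem.Dict String Int × PySem.Dict String Int × PySem.Dict String Int),
      devs.foldl pvDevStep acc
        = (devs.foldl (fun g a => (pvCat a "buttons").foldl pvBtnStep g) acc.1,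
           devs.foldl (fun g a => (pvCat a "axes").foldl pvAxStep g) acc.2.1,
           devs.foldl (fun g a => (pvCat a "hits").foldl pvHitStep g) acc.2.2) := by
  intro devs
  induction devs with
  | nil => intro acc; rfl
  | cons dev t ih => intro acc; rw [List.foldl_cons, ih]; rfl

theorem pvDevFold_eq (sbd : List (String × List (String × List (String × Int)))) :
    (sbd.map (fun p => p.2)).foldl pvDevStep (PySem.Dict.empty, PySem.Dict.empty, PySem.Dict.empty)
      = ((pvPairs sbd "buttons").foldl pvBtnStep PySem.Dict.empty,
         (pvPairs sbd "axes").foldl pvAxStep PySem.Dict.empty,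
         (pvPairs sbd "hits").foldl pvHitStep PySem.Dict.empty) := by
  unfold pvPairs
  rw [← pvFoldl_flatMap (fun dev => pvCat dev "buttons") pvBtnStep,
      ← pvFoldl_flatMap (fun dev => pvCat dev "axes") pvAxStep,
      ← pvFoldl_flatMap (fun dev => pvCat dev "hits") pvHitStep]
  exact pvDevFoldAux (sbd.map (fun p => p.2)) (PySem.Dict.empty, PySem.Dict.empty, PySem.Dict.empty)

theorem pvGet?_mapRed (f : Int → Int → Int) (g : PySem.Dict String (List Int)) (k : String) :
    (pvMapRed f g).get? k = (g.get? k).map (fun vs => vs.foldl f 0) := by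
  unfold pvMapRed PySem.Dict.get?
  rw [show (PySem.Dict.mk (g.items.map (fun p => (p.1, p.2.foldl f 0)))).items
        = g.items.map (fun p => (p.1, p.2.foldl f 0)) from rfl,
      List.find?_map]
  rw [Option.map_map, Option.map_map]
  rfl

theorem pvContains_mapRed (f : Int → Int → Int) (g : PySem.Dict String (List Int)) (k : String) :
    (pvMapRed f g).contains k = g.contains k := by
  unfold pvMapRed PySem.Dict.contains
  rw [show (PySem.Dict.mk (g.items.map (fun p => (p.1, p.2.foldl f 0)))).items
        = g.items.map (fun p => (p.1, p.2.foldl f 0)) from rfl,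
      List.any_map]
  rfl

theorem pvGStep_mapRed (f : Int → Int → Int) (g : PySem.Dict String (List Int)) (kv : String × Int) :
    pvMapRed f (pvGStep g kv) = pvUpd f (pvMapRed f g) kv := by
  obtain ⟨k, v⟩ := kv
  unfold pvGStep pvUpd
  rw [show g.modify k [] (fun vs => vs ++ [v]) = g.insert k (g.getD k [] ++ [v]) from rfl]
  by_cases hc : g.contains k = true
  · have hsome : (g.get? k).isSome := by rw [← PySem.Dict.contains_eq_isSome_get?]; exact hc
    obtain ⟨vs, hvs⟩ := Option.isSome_iff_exists.mp hsome
    have hgD : g.getD k [] = vs := PySem.Dict.getD_of_get?_eq_some g [] hvs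
    have hdD : (pvMapRed f g).getD k 0 = vs.foldl f 0 := by
      rw [PySem.Dict.getD_eq_get?_getD, pvGet?_mapRed, hvs]; rfl
    have hdc : (pvMapRed f g).contains k = true := by rw [pvContains_mapRed]; exact hc
    apply PySem.Dict.ext
    rw [show (pvMapRed f (g.insert k (g.getD k [] ++ [v]))).items
          = (g.insert k (g.getD k [] ++ [v])).items.map (fun p => (p.1, p.2.foldl f 0)) from rfl,
        PySem.Dict.items_insert_of_contains g _ hc,
        PySem.Dict.items_insert_of_contains _ _ hdc,
        show (pvMapRed f g).items = g.items.map (fun p => (p.1, p.2.foldl f 0)) from rfl,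
        List.map_map, List.map_map]
    apply List.map_congr_left
    intro p _
    by_cases hpk : (p.1 == k) = true
    · simp [Function.comp, hpk, hgD, hdD, List.foldl_append]
    · simp [Function.comp, hpk]
  · have hc' : g.contains k = false := by simpa using hc
    have hdc : (pvMapRed f g).contains k = false := by rw [pvContains_mapRed]; exact hc'
    have hgD : g.getD k [] = [] := PySem.Dict.getD_of_not_contains g [] hc'
    have hdD : (pvMapRed f g).getD k 0 = 0 := PySem.Dict.getD_of_not_contains _ 0 hdc
    apply PySem.Dict.ext
    rw [show (pvMapRed f (g.insert k (g.getD k [] ++ [v]))).items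
          = (g.insert k (g.getD k [] ++ [v])).items.map (fun p => (p.1, p.2.foldl f 0)) from rfl,
        PySem.Dict.items_insert_of_not_contains g _ hc',
        PySem.Dict.items_insert_of_not_contains _ _ hdc, hdD, hgD]
    simp [pvMapRed]

theorem pvFold_upd_eq_mapRed (f : Int → Int → Int) (ps : List (String × Int)) :
    ps.foldl (pvUpd f) PySem.Dict.empty = pvMapRed f (ps.foldl pvGStep PySem.Dict.empty) := by
  induction ps using List.reverseRecOn with
  | nil => rfl
  | append_singleton t p ih =>
      rw [List.foldl_append, List.foldl_append, ih,
          show [p].foldl pvGStep (t.foldl pvGStep PySem.Dict.empty)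
            = pvGStep (t.foldl pvGStep PySem.Dict.empty) p from rfl,
          pvGStep_mapRed]
      rfl

theorem pvNodup_fold_upd (f : Int → Int → Int) (ps : List (String × Int)) :
    (ps.foldl (pvUpd f) PySem.Dict.empty).keys.Nodup := by
  unfold pvUpd
  exact PySem.Dict.nodup_keys_foldl_insert_key ps Prod.fst
    (fun d x => f (d.getD x.1 0) x.2) PySem.Dict.empty PySem.Dict.nodup_keys_empty

-- overwriting a present key with its own current value is a no-op (unique keys)
theorem pvInsert_getD_self (d : PySem.Dict String Int) (k : String)
    (hd : d.keys.Nodup) (hc : d.contains k = true) : d.insert k (d.getD k 0) = d := by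
  have hsome : (d.get? k).isSome := by rw [← PySem.Dict.contains_eq_isSome_get?]; exact hc
  obtain ⟨c, hvc⟩ := Option.isSome_iff_exists.mp hsome
  have hgD : d.getD k 0 = c := PySem.Dict.getD_of_get?_eq_some d 0 hvc
  have hmem : (k, c) ∈ d.items := PySem.Dict.mem_items_of_get?_eq_some d hvc
  have hnd : (d.items.map (fun x => x.1)).Nodup := hd
  apply PySem.Dict.ext
  rw [PySem.Dict.items_insert_of_contains d _ hc]
  conv_rhs => rw [← List.map_id d.items]
  apply List.map_congr_left
  intro p hp
  by_cases hpk : (p.1 == k) = true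
  · have hp1 : p.1 = k := by simpa using hpk
    have : p = (k, c) := List.inj_on_of_nodup_map hnd hp hmem (by simpa using hp1)
    simp [this, hgD]
  · simp [hpk]

theorem pvBtnStep_eq (d : PySem.Dict String Int) (kv : String × Int) (hd : d.keys.Nodup) :
    pvBtnStep d kv = pvUpd pvLastNonzero d kv := by
  obtain ⟨k, v⟩ := kv
  unfold pvBtnStep pvUpd pvLastNonzero
  by_cases hv : v ≠ 0
  · simp [hv]
  · rw [not_not] at hv
    subst hv
    by_cases hc : d.contains k = false
    · simp [hc, PySem.Dict.getD_of_not_contains d 0 hc]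
    · have hc' : d.contains k = true := by simpa using hc
      have h0 : (if (0:Int) ≠ 0 then (0:Int) else d.getD k 0) = d.getD k 0 := by simp
      rw [if_neg (by simp), if_neg (by simp [hc']), h0]
      exact (pvInsert_getD_self d k hd hc').symm

theorem pvAxStep_eq (d : PySem.Dict String Int) (kv : String × Int) (hd : d.keys.Nodup) :
    pvAxStep d kv = pvUpd pvMaxAbs d kv := by
  obtain ⟨k, v⟩ := kv
  unfold pvAxStep pvUpd pvMaxAbs
  by_cases hc : d.contains k = false
  · have hgD : d.getD k 0 = 0 := PySem.Dict.getD_of_not_contains d 0 hc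
    have hval : (if |v| > |(0:Int)| then v else (0:Int)) = v := by
      rcases eq_or_ne v 0 with h | h
      · simp [h]
      · simp [abs_pos.mpr h]
    rw [hgD, hval, if_pos (Or.inl hc)]
  · have hc' : d.contains k = true := by simpa using hc
    by_cases habs : |v| > |d.getD k 0|
    · rw [if_pos (Or.inr habs), if_pos habs]
    · rw [if_neg (by simp [hc', habs]), if_neg habs]
      exact (pvInsert_getD_self d k hd hc').symm

theorem pvHitStep_eq (d : PySem.Dict String Int) (kv : String × Int) :
    pvHitStep d kv = pvUpd pvMaxPos d kv := by
  rfl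

theorem pvBtnFold (ps : List (String × Int)) :
    ps.foldl pvBtnStep PySem.Dict.empty = ps.foldl (pvUpd pvLastNonzero) PySem.Dict.empty := by
  induction ps using List.reverseRecOn with
  | nil => rfl
  | append_singleton t p ih =>
      rw [List.foldl_append, List.foldl_append, ih]
      simp only [List.foldl_cons, List.foldl_nil]
      rw [pvBtnStep_eq _ p (pvNodup_fold_upd pvLastNonzero t)]

theorem pvAxFold (ps : List (String × Int)) :
    ps.foldl pvAxStep PySem.Dict.empty = ps.foldl (pvUpd pvMaxAbs) PySem.Dict.empty := by
  induction ps using List.reverseRecOn with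
  | nil => rfl
  | append_singleton t p ih =>
      rw [List.foldl_append, List.foldl_append, ih]
      simp only [List.foldl_cons, List.foldl_nil]
      rw [pvAxStep_eq _ p (pvNodup_fold_upd pvMaxAbs t)]

theorem pvHitFold (ps : List (String × Int)) :
    ps.foldl pvHitStep PySem.Dict.empty = ps.foldl (pvUpd pvMaxPos) PySem.Dict.empty := by
  induction ps using List.reverseRecOn with
  | nil => rfl
  | append_singleton t p ih =>
      rw [List.foldl_append, List.foldl_append, ih]
      simp only [List.foldl_cons, List.foldl_nil]
      rw [pvHitStep_eq _ p]

-- ===== VERDICT (by name: the statement is the Claim_ definition above) =====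
theorem merged_state_spec : Claim_equal_merged_state := by
  intro sbd _
  unfold Spec_merged_state merged_state merged_state_alt
  rw [pvDevFold_eq, pvBtnFold, pvAxFold, pvHitFold,
      pvFold_upd_eq_mapRed, pvFold_upd_eq_mapRed, pvFold_upd_eq_mapRed,
      pvGroup_eq_foldl, pvGroup_eq_foldl, pvGroup_eq_foldl]
  rfl
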